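-- pv_equiv track=rewrite | github.com/annhilati/beetsmith | customitemlib/lib.py | ensureResourceLocation
-- ===== SOURCE A (Python) =====
-- def ensureResourceLocation(str: str) -> str:
--     for char in str.lower():
--         if char not in "abcdefghijklmnopqrstuvwxyz_/:":
--             raise ValueError(f"{str} is not a valid resource location")
--
--     if str.startswith(":") or str.endswith(":"):
--         raise ValueError(f"{str} is not a valid resource location")
--
--     if str.count(":") == 1:
--         return str
--     elif str.count(":") == 0:
--         return f"minecraft:{str}"
--     else:
--         raise ValueError(f"{str} is not a valid resource location")
-- ===== SOURCE B (Python) =====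
-- def ensureResourceLocation(str: str) -> str:
--     head, sep, tail = str.lower().partition(":")
--     allowed = set("abcdefghijklmnopqrstuvwxyz_/")
--     if not (set(head) <= allowed and set(tail) <= allowed and (not sep or (head and tail))):
--         raise ValueError(f"{str} is not a valid resource location")
--     return str if sep else f"minecraft:{str}"
-- ===== Notes on version B (the rewrite author's own statement) =====
-- stated objective: idiomatic
-- what changed: A's per-character membership loop plus separate startswith/endswith checks and two count(':') passes are replaced by a single str.lower().partition(':') with set-inclusion tests on the two parts.
import Mathlib
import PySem

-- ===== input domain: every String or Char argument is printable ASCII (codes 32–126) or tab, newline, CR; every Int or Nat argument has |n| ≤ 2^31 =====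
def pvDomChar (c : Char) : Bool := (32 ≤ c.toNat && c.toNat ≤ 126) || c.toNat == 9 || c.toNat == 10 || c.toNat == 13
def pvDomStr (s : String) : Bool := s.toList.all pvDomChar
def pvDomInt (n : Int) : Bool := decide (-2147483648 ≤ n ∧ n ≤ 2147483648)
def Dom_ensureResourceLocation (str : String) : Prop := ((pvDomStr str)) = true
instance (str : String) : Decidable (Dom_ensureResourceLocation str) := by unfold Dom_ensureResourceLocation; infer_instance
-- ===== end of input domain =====

-- B replaces A's per-character membership loop, two count(":") passes and startswith/endswith
-- checks by a single partition(":") plus per-part membership tests (idiomatic; A raises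
-- ValueError on invalid input — those inputs are excluded by Pre_, where both ports return "").


-- ===== PORT A =====
-- the literal "abcdefghijklmnopqrstuvwxyz_/:" whose membership A's loop tests
def pvLegal : List Char := "abcdefghijklmnopqrstuvwxyz_/:".toList

-- literal port of A: per-char membership loop over str.lower(), then the startswith/endswith
-- check, then the count(":") chain.  Where Python raises ValueError the port returns "" (outside Pre_).
def ensureResourceLocation (str : String) : String :=
  if !((PySem.Str.lower str).toList.all (fun c => pvLegal.contains c)) then ""  -- raise ValueError
  else if PySem.Str.startswith str ":" || PySem.Str.endswith str ":" then ""    -- raise ValueError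
  else if PySem.Str.count str ":" == 1 then str
  else if PySem.Str.count str ":" == 0 then String.ofList ("minecraft:".toList ++ str.toList)  -- f"minecraft:{str}"
  else ""  -- raise ValueError

-- ===== PORT B =====
def pvAllowed : List Char := "abcdefghijklmnopqrstuvwxyz_/".toList

-- literal port of Source B: str.lower().partition(":") is ported by hand (exact): head = the chars
-- before the first ':', rest = the remainder starting at that ':' ([] when there is no ':'),
-- so rest.tail is partition's third component and rest.isEmpty ↔ the separator was not found.
def ensureResourceLocation_alt (str : String) : String :=
  let l := (PySem.Str.lower str).toList
  let head := l.takeWhile (fun c => c != ':')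
  let rest := l.dropWhile (fun c => c != ':')
  let ok := head.all (fun c => pvAllowed.contains c) &&
            rest.tail.all (fun c => pvAllowed.contains c) &&
            (rest.isEmpty || (!head.isEmpty && !rest.tail.isEmpty))
  if ok then
    (if rest.isEmpty then String.ofList ("minecraft:".toList ++ str.toList) else str)  -- f"minecraft:{str}" / str
  else ""  -- raise ValueError

-- ===== PRECONDITION & SPEC =====
-- Pre_ excludes exactly the inputs on which A raises ValueError: a character whose lowercase
-- form is outside "abcdefghijklmnopqrstuvwxyz_/:", a leading or trailing ':', or two or more ':'.
def Pre_ensureResourceLocation (str : String) : Prop :=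
  (str.toList.all (fun c => (':' :: pvAllowed).contains (PySem.Chars.lowerChar c))) = true ∧
  str.toList.count ':' ≤ 1 ∧
  str.toList.head? ≠ some ':' ∧
  str.toList.getLast? ≠ some ':'
instance (str : String) : Decidable (Pre_ensureResourceLocation str) := by
  unfold Pre_ensureResourceLocation; infer_instance

def pvWitness_ensureResourceLocation : String := "my_mod:item"

def Spec_ensureResourceLocation (str : String) (out : String) : Prop := out = ensureResourceLocation_alt str
instance (str : String) (out : String) : Decidable (Spec_ensureResourceLocation str out) := by unfold Spec_ensureResourceLocation; infer_instance

-- ===== CLAIM (what is proved, stated in full; the proofs are below) =====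
def Claim_equal_ensureResourceLocation : Prop := ∀ (str : String), Dom_ensureResourceLocation str → Pre_ensureResourceLocation str → Spec_ensureResourceLocation str (ensureResourceLocation str)

-- ===== LEMMAS AND PROOFS =====

-- lowering a character yields ':' only for ':' itself
lemma lowerChar_eq_colon_iff (c : Char) : PySem.Chars.lowerChar c = ':' ↔ c = ':' := by
  unfold PySem.Chars.lowerChar PySem.Chars.isupper
  split_ifs with h
  · simp only [Bool.and_eq_true, decide_eq_true_eq] at h
    obtain ⟨h1, h2⟩ := h
    simp only [Char.le_def, UInt32.le_iff_toNat_le] at h1 h2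
    have h1' : 65 ≤ c.toNat := h1
    have h2' : c.toNat ≤ 90 := h2
    constructor
    · intro he
      have hv : Nat.isValidChar (c.toNat + 32) := Or.inl (by omega)
      have := Char.toNat_ofNat (c.toNat + 32)
      rw [he, if_pos hv] at this
      have h58 : (':' : Char).toNat = 58 := by decide
      omega
    · intro he; subst he; simp at h1'
  · exact Iff.rfl

-- s.count(sub) for a one-character sub is the plain list count
lemma go_count (c : Char) : ∀ (l : List Char) (fuel acc : Nat), l.length ≤ fuel →
    PySem.Chars.count.go [c] fuel l acc = acc + l.count c := by
  intro l
  induction l with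
  | nil => intro fuel acc h; cases fuel <;> simp [PySem.Chars.count.go]
  | cons hd t ih =>
    intro fuel acc h
    simp only [List.length_cons] at h
    cases fuel with
    | zero => omega
    | succ n =>
      rw [PySem.Chars.count.go]
      simp only [List.isPrefixOf, Bool.and_true]
      by_cases he : c = hd
      · subst he
        simp only [beq_self_eq_true, if_pos, List.length_cons, List.length_nil,
          Nat.zero_add, List.drop_succ_cons, List.drop_zero]
        rw [ih n (acc+1) (by omega)]
        simp
        omega
      · rw [if_neg (by simp [he])]
        rw [ih n acc (by omega)]
        simp [Ne.symm he]

lemma count_singleton_eq (l : List Char) (c : Char) : PySem.Chars.count l [c] = l.count c := by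
  unfold PySem.Chars.count
  simp [go_count c l l.length 0 le_rfl]

-- lowering preserves the number of ':'
lemma map_lower_count (l : List Char) :
    (l.map PySem.Chars.lowerChar).count ':' = l.count ':' := by
  rw [List.count_eq_countP, List.count_eq_countP, List.countP_map]
  apply List.countP_congr
  intro c _
  simp [Function.comp, lowerChar_eq_colon_iff c]

lemma singleton_prefix_iff (c : Char) (m : List Char) : [c] <+: m ↔ m.head? = some c := by
  cases m with
  | nil => simp
  | cons h t => simp [List.cons_prefix_cons, eq_comm]

lemma singleton_suffix_iff (l : List Char) (c : Char) : [c] <:+ l ↔ l.getLast? = some c := by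
  rw [← List.reverse_prefix, ← List.head?_reverse]
  exact singleton_prefix_iff c l.reverse

lemma allowed_of_legal (c : Char) (h : c ∈ ':' :: pvAllowed) (hne : c ≠ ':') :
    pvAllowed.contains c = true := by
  rcases List.mem_cons.mp h with h | h
  · exact absurd h hne
  · simpa using h

lemma ports_agree (str : String)
    (h1 : ∀ c ∈ str.toList, PySem.Chars.lowerChar c ∈ ':' :: pvAllowed)
    (h2 : str.toList.count ':' ≤ 1) (h3 : str.toList.head? ≠ some ':')
    (h4 : str.toList.getLast? ≠ some ':') :
    ensureResourceLocation str = ensureResourceLocation_alt str := by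
  unfold ensureResourceLocation ensureResourceLocation_alt
  set l := str.toList with hl
  set l' := (PySem.Str.lower str).toList with hl'
  have hmap : l' = l.map PySem.Chars.lowerChar := by
    rw [hl', PySem.Str.toList_lower]; rfl
  have hmem : ∀ c ∈ l', c ∈ ':' :: pvAllowed := by
    intro c hc
    rw [hmap, List.mem_map] at hc
    obtain ⟨a, ha, rfl⟩ := hc
    exact h1 a ha
  have hall : l'.all (fun c => pvLegal.contains c) = true := by
    rw [List.all_eq_true]
    intro c hc
    have hm := hmem c hc
    have hle : pvLegal = pvAllowed ++ [':'] := rfl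
    rw [hle]
    rcases List.mem_cons.mp hm with h | h <;> simp [h]
  rw [hall]
  have hsw : PySem.Str.startswith str ":" = false := by
    simp only [PySem.Str.startswith_eq]
    rw [Bool.eq_false_iff]
    intro hp
    rw [show (":" : String).toList = [':'] from rfl] at hp
    unfold PySem.Chars.startswith at hp
    rw [List.isPrefixOf_iff_prefix, singleton_prefix_iff] at hp
    exact h3 hp
  have hew : PySem.Str.endswith str ":" = false := by
    simp only [PySem.Str.endswith_eq]
    rw [Bool.eq_false_iff]
    intro hp
    rw [show (":" : String).toList = [':'] from rfl] at hp
    unfold PySem.Chars.endswith at hp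
    rw [List.isSuffixOf_iff_suffix, singleton_suffix_iff] at hp
    exact h4 hp
  rw [hsw, hew]
  have hcnt : PySem.Str.count str ":" = l.count ':' := by
    simp only [PySem.Str.count_eq]
    rw [show (":" : String).toList = [':'] from rfl]
    exact count_singleton_eq _ _
  have hcnt' : l'.count ':' = l.count ':' := by rw [hmap]; exact map_lower_count l
  rw [hcnt]
  have h3' : l'.head? ≠ some ':' := by
    rw [hmap, List.head?_map]
    intro hcontra
    rcases Option.map_eq_some_iff.mp hcontra with ⟨a, ha, hla⟩
    rw [lowerChar_eq_colon_iff] at hla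
    exact h3 (hla ▸ ha)
  have h4' : l'.getLast? ≠ some ':' := by
    rw [hmap, List.getLast?_map]
    intro hcontra
    rcases Option.map_eq_some_iff.mp hcontra with ⟨a, ha, hla⟩
    rw [lowerChar_eq_colon_iff] at hla
    exact h4 (hla ▸ ha)
  -- inline B's lets so the branch conditions can be rewritten
  have hBeq : (let l2 := (PySem.Str.lower str).toList
      let head := l2.takeWhile (fun c => c != ':')
      let rest := l2.dropWhile (fun c => c != ':')
      let ok := head.all (fun c => pvAllowed.contains c) &&
                rest.tail.all (fun c => pvAllowed.contains c) &&
                (rest.isEmpty || (!head.isEmpty && !rest.tail.isEmpty))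
      if ok then (if rest.isEmpty then String.ofList ("minecraft:".toList ++ str.toList) else str)
      else "") =
      (if ((l'.takeWhile (fun c => c != ':')).all (fun c => pvAllowed.contains c) &&
           (l'.dropWhile (fun c => c != ':')).tail.all (fun c => pvAllowed.contains c) &&
           ((l'.dropWhile (fun c => c != ':')).isEmpty ||
             (!(l'.takeWhile (fun c => c != ':')).isEmpty && !(l'.dropWhile (fun c => c != ':')).tail.isEmpty)))
        then (if (l'.dropWhile (fun c => c != ':')).isEmpty
              then String.ofList ("minecraft:".toList ++ str.toList) else str)
        else "") := rfl
  rw [hBeq]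
  interval_cases hc : l.count ':'
  · -- no colon in str
    have hnm : ':' ∉ l' := by rw [← List.count_eq_zero]; omega
    have hdw : l'.dropWhile (fun c => c != ':') = [] := by
      rw [List.dropWhile_eq_nil_iff]
      intro x hx
      simp only [bne_iff_ne, ne_eq]
      exact fun he => hnm (he ▸ hx)
    have htw : l'.takeWhile (fun c => c != ':') = l' := by
      rw [List.takeWhile_eq_self_iff]
      intro x hx
      simp only [bne_iff_ne, ne_eq]
      exact fun he => hnm (he ▸ hx)
    simp only [hdw, htw]
    have hha : l'.all (fun c => pvAllowed.contains c) = true := by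
      rw [List.all_eq_true]
      intro c hc'
      exact allowed_of_legal c (hmem c hc') (fun he => hnm (he ▸ hc'))
    simp only [hha]
    simp
    rfl
  · -- exactly one colon in str
    have hm' : ':' ∈ l' := by rw [← List.count_pos_iff]; omega
    have hdwne : l'.dropWhile (fun c => c != ':') ≠ [] := by
      intro hcon
      rw [List.dropWhile_eq_nil_iff] at hcon
      simpa using hcon ':' hm'
    set rest := l'.dropWhile (fun c => c != ':') with hrest
    set hd := l'.takeWhile (fun c => c != ':') with hhd
    have hheadc : rest.head hdwne = ':' := by
      have := List.head_dropWhile_not (fun c => c != ':') hdwne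
      simpa using this
    have hrc : rest = ':' :: rest.tail := by
      conv_lhs => rw [← List.cons_head_tail hdwne, hheadc]
    have hdec : hd ++ rest = l' := List.takeWhile_append_dropWhile
    have hcnthd : hd.count ':' = 0 := by
      rw [List.count_eq_zero]
      intro hmem'
      have := List.mem_takeWhile_imp hmem'
      simp at this
    have hcnttail : rest.tail.count ':' = 0 := by
      have : hd.count ':' + rest.count ':' = 1 := by
        rw [← List.count_append, hdec]; omega
      rw [hcnthd, hrc] at this
      simp at this
      omega
    have hnmt : ':' ∉ rest.tail := List.count_eq_zero.mp hcnttail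
    have hmeml' : ∀ c ∈ hd, c ∈ l' := fun c hc' => hdec ▸ List.mem_append_left _ hc'
    have hmemt : ∀ c ∈ rest.tail, c ∈ l' := by
      intro c hc'
      have : c ∈ rest := hrc ▸ List.mem_cons_of_mem _ hc'
      exact hdec ▸ List.mem_append_right _ this
    have hahd : hd.all (fun c => pvAllowed.contains c) = true := by
      rw [List.all_eq_true]
      intro c hc'
      have hne : c ≠ ':' := by
        have := List.mem_takeWhile_imp (hhd ▸ hc')
        simpa using this
      exact allowed_of_legal c (hmem c (hmeml' c hc')) hne
    have hatl : rest.tail.all (fun c => pvAllowed.contains c) = true := by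
      rw [List.all_eq_true]
      intro c hc'
      exact allowed_of_legal c (hmem c (hmemt c hc')) (fun he => hnmt (he ▸ hc'))
    have hhdne : hd.isEmpty = false := by
      rw [List.isEmpty_eq_false_iff]
      intro he
      apply h3'
      rw [← hdec, he, List.nil_append, hrc]
      rfl
    have htlne : rest.tail.isEmpty = false := by
      rw [List.isEmpty_eq_false_iff]
      intro he
      apply h4'
      rw [← hdec, hrc, he]
      exact List.getLast?_concat
    have hrne : rest.isEmpty = false := by
      rw [List.isEmpty_eq_false_iff]; exact hdwne
    simp only [hahd, hatl, hhdne, htlne, hrne]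
    simp

-- ===== VERDICT (by name: the statement is the Claim_ definition above) =====
theorem ensureResourceLocation_spec : Claim_equal_ensureResourceLocation := by
  intro str _ pre
  obtain ⟨h1, h2, h3, h4⟩ := pre
  rw [List.all_eq_true] at h1
  show ensureResourceLocation str = ensureResourceLocation_alt str
  exact ports_agree str (fun c hc => by simpa using h1 c hc) h2 h3 h4
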